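-- pv_equiv track=rewrite | github.com/FunkeCoder23/Discord-Bot | cogs/shitbot.py | clapbackify
-- ===== SOURCE A (Python) =====
-- def clapbackify(text):
--     newText = ":clap: "
--     for i in text:
--         if i == ' ':
--             newText += " :clap: "
--         else:
--             newText += i.upper()
--     newText += " :clap:"
--     return newText
-- ===== SOURCE B (Python) =====
-- def clapbackify(text):
--     words = text.upper().split(' ')
--     return ":clap: " + " :clap: ".join(words) + " :clap:"
-- ===== Notes on version B (the rewrite author's own statement) =====
-- stated objective: simpler
-- what changed: Replaced the per-character loop with its space-vs-character branch and incremental string accumulation by an upper/split-on-space/join pipeline over whole words.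
import Mathlib
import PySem

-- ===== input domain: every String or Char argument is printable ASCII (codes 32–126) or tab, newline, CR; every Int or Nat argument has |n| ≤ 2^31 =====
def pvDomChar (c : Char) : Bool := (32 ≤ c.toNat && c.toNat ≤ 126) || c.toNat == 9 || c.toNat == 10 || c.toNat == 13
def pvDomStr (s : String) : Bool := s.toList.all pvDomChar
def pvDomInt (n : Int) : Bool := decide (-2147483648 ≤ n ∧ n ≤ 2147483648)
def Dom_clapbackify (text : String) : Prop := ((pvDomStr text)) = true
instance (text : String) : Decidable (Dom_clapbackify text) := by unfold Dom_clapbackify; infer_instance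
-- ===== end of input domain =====

-- B replaces A's per-character loop and += accumulation by an upper/split(' ')/join pipeline (simpler decomposition; return value only).

-- ===== PORT A =====
def clapbackify (text : String) : String :=
  String.mk
    ((text.toList.foldl
      (fun newText i =>
        if i = ' ' then newText ++ " :clap: ".toList
        else newText ++ [PySem.Chars.upperChar i])
      ":clap: ".toList) ++ " :clap:".toList)

-- ===== PORT B =====
def clapbackify_alt (text : String) : String :=
  let words := PySem.Chars.splitOn (PySem.Chars.upper text.toList) [' ']
  String.mk (":clap: ".toList ++ PySem.Chars.join " :clap: ".toList words ++ " :clap:".toList)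

-- ===== PRECONDITION & SPEC =====
def Spec_clapbackify (text : String) (out : String) : Prop := out = clapbackify_alt text
instance (text : String) (out : String) : Decidable (Spec_clapbackify text out) := by unfold Spec_clapbackify; infer_instance

-- ===== CLAIM (what is proved, stated in full; the proofs are below) =====
def Claim_equal_clapbackify : Prop := ∀ (text : String), Dom_clapbackify text → Spec_clapbackify text (clapbackify text)

-- ===== LEMMAS AND PROOFS =====

-- single-char split, as a (head-part, remaining-parts) pair
def spl (c : Char) : List Char → List Char × List (List Char)
  | [] => ([], [])
  | x :: xs =>
    let r := spl c xs
    if x = c then ([], r.1 :: r.2) else (x :: r.1, r.2)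

theorem spl_cons_self (c : Char) (xs : List Char) :
    spl c (c :: xs) = ([], (spl c xs).1 :: (spl c xs).2) := by
  simp [spl]

theorem spl_cons_ne (c x : Char) (xs : List Char) (hx : x ≠ c) :
    spl c (x :: xs) = (x :: (spl c xs).1, (spl c xs).2) := by
  simp [spl, hx]

theorem go_single (c : Char) : ∀ (l : List Char) (fuel : Nat) (cur : List Char)
    (acc : List (List Char)), l.length ≤ fuel →
    PySem.Chars.splitOn.go [c] fuel l cur acc
      = acc.reverse ++ ((cur.reverse ++ (spl c l).1) :: (spl c l).2) := by
  intro l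
  induction l with
  | nil =>
    intro fuel cur acc _
    cases fuel <;> simp [PySem.Chars.splitOn.go, spl]
  | cons x xs ih =>
    intro fuel cur acc h
    cases fuel with
    | zero => simp at h
    | succ f =>
      by_cases hx : c = x
      · subst hx
        have hstep : PySem.Chars.splitOn.go [c] (f+1) (c :: xs) cur acc
            = PySem.Chars.splitOn.go [c] f xs [] (cur.reverse :: acc) := by
          simp [PySem.Chars.splitOn.go, List.isPrefixOf]
        rw [hstep, ih f [] (cur.reverse :: acc) (by simpa using h), spl_cons_self]
        simp
      · have hstep : PySem.Chars.splitOn.go [c] (f+1) (x :: xs) cur acc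
            = PySem.Chars.splitOn.go [c] f xs (x :: cur) acc := by
          simp [PySem.Chars.splitOn.go, List.isPrefixOf, hx]
        rw [hstep, ih f (x :: cur) acc (by simpa using h),
          spl_cons_ne c x xs (fun h' => hx h'.symm)]
        simp
theorem splitOn_single (c : Char) (s : List Char) :
    PySem.Chars.splitOn s [c] = (spl c s).1 :: (spl c s).2 := by
  unfold PySem.Chars.splitOn
  rw [go_single c s (s.length + 1) [] [] (by omega)]
  simp

theorem upperChar_eq_space_iff (c : Char) :
    PySem.Chars.upperChar c = ' ' ↔ c = ' ' := by
  unfold PySem.Chars.upperChar PySem.Chars.islower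
  split_ifs with h
  · simp only [Bool.and_eq_true, decide_eq_true_eq, Char.le_def] at h
    constructor
    · intro hc
      exfalso
      have h1 : 97 ≤ c.toNat := h.1
      have h2 : c.toNat ≤ 122 := h.2
      have hval : (c.toNat - 32).isValidChar := Or.inl (by omega)
      have hv : (Char.ofNat (c.toNat - 32)).toNat = c.toNat - 32 := by
        simp [Char.ofNat, hval, Char.ofNatAux]
      have ht := congrArg Char.toNat hc
      rw [hv] at ht
      have hsp : (' ' : Char).toNat = 32 := by decide
      rw [hsp] at ht
      omega
    · intro hc
      subst hc
      exfalso
      have h1 : 97 ≤ (' ' : Char).toNat := h.1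
      have hsp : (' ' : Char).toNat = 32 := by decide
      omega
  · exact Iff.rfl

-- A's loop body, flattened
theorem foldl_body (cs : List Char) : ∀ (acc : List Char),
    cs.foldl
      (fun newText i =>
        if i = ' ' then newText ++ " :clap: ".toList
        else newText ++ [PySem.Chars.upperChar i]) acc
      = acc ++ cs.flatMap
          (fun i => if i = ' ' then " :clap: ".toList else [PySem.Chars.upperChar i]) := by
  induction cs with
  | nil => intro acc; simp
  | cons x xs ih =>
    intro acc
    by_cases hx : x = ' '
    · rw [List.foldl_cons, if_pos hx, ih, List.flatMap_cons, if_pos hx, List.append_assoc]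
    · rw [List.foldl_cons, if_neg hx, ih, List.flatMap_cons, if_neg hx, List.append_assoc]

theorem join_cons₂ (sep a b : List Char) (t : List (List Char)) :
    PySem.Chars.join sep (a :: b :: t) = a ++ sep ++ PySem.Chars.join sep (b :: t) := by
  simp [PySem.Chars.join, List.intercalate, List.intersperse]

theorem join_spl (cs : List Char) :
    PySem.Chars.join " :clap: ".toList
        ((spl ' ' (PySem.Chars.upper cs)).1 :: (spl ' ' (PySem.Chars.upper cs)).2)
      = cs.flatMap
          (fun i => if i = ' ' then " :clap: ".toList else [PySem.Chars.upperChar i]) := by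
  induction cs with
  | nil => simp [PySem.Chars.upper, spl, PySem.Chars.join, List.intercalate]
  | cons x xs ih =>
    have hup : PySem.Chars.upper (x :: xs) = PySem.Chars.upperChar x :: PySem.Chars.upper xs := by
      simp [PySem.Chars.upper]
    by_cases hx : x = ' '
    · subst hx
      have hu : PySem.Chars.upperChar ' ' = ' ' := by decide
      rw [hup, hu, spl_cons_self, join_cons₂, ih, List.flatMap_cons, if_pos rfl,
        List.nil_append]
    · have hu : PySem.Chars.upperChar x ≠ ' ' := fun hc => hx ((upperChar_eq_space_iff x).mp hc)
      rw [hup, spl_cons_ne ' ' _ _ hu]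
      have hstep : PySem.Chars.join " :clap: ".toList
          ((PySem.Chars.upperChar x :: (spl ' ' (PySem.Chars.upper xs)).1)
            :: (spl ' ' (PySem.Chars.upper xs)).2)
          = PySem.Chars.upperChar x
            :: PySem.Chars.join " :clap: ".toList
                ((spl ' ' (PySem.Chars.upper xs)).1 :: (spl ' ' (PySem.Chars.upper xs)).2) := by
        cases h : (spl ' ' (PySem.Chars.upper xs)).2 with
        | nil => simp [PySem.Chars.join, List.intercalate, List.intersperse]
        | cons b t => rw [join_cons₂, join_cons₂]; simp
      rw [hstep, ih, List.flatMap_cons, if_neg hx]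
      simp

-- ===== VERDICT (by name: the statement is the Claim_ definition above) =====
theorem clapbackify_spec : Claim_equal_clapbackify := by
  intro text _
  unfold Spec_clapbackify clapbackify clapbackify_alt
  rw [foldl_body]
  simp only [splitOn_single, join_spl]
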